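-- pv_equiv track=rewrite | github.com/svennikue/multiple_clocks_repo | scripts/simulation_try_v10.py | walksteps
-- ===== SOURCE A (Python) =====
-- def walksteps(startcoords, stopcoords):
--     #import pdb; pdb.set_trace()
--     stepsxdir = stopcoords[0]-startcoords[0]
--     stepsydir = stopcoords[1]-startcoords[1]
--     num_steps = abs(stepsxdir) + abs(stepsydir)
--     currcoord = list(startcoords)
--     path = list()
--     path.append(startcoords)
--     for i in range(abs(stepsxdir)):
--         if stepsxdir < 0: # if smaller than 0, go left
--             currcoord[0]=currcoord[0]-1
--             path.append([x for x in currcoord])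
--         elif stepsxdir > 0: # if smaller than 0, go right
--             currcoord[0]=currcoord[0]+1
--             path.append([x for x in currcoord])
--     for i in range(abs(stepsydir)):
--         if stepsydir < 0: # if smaller than 0, go up
--             currcoord[1]=currcoord[1]-1
--             path.append([x for x in currcoord])
--         elif stepsydir > 0: # if bigger than 0, go down
--             currcoord[1]=currcoord[1]+1
--             path.append([x for x in currcoord])
--     return path, num_steps
-- ===== SOURCE B (Python) =====
-- def walksteps(startcoords, stopcoords):
--     sx = stopcoords[0] - startcoords[0]
--     sy = stopcoords[1] - startcoords[1]
--     ax = abs(sx)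
--     num_steps = ax + abs(sy)
--
--     def coord(k):
--         # closed-form coordinate of the k-th step of the Manhattan path
--         c = list(startcoords)
--         if k <= ax:
--             c[0] = startcoords[0] + (k if sx > 0 else -k)
--         else:
--             c[0] = stopcoords[0]
--             c[1] = startcoords[1] + ((k - ax) if sy > 0 else -(k - ax))
--         return c
--
--     return [startcoords] + [coord(k) for k in range(1, num_steps + 1)], num_steps
-- ===== Notes on version B (the rewrite author's own statement) =====
-- stated objective: alternative
-- what changed: B computes the k-th path coordinate as a closed-form function of the step index k in one comprehension over range(1, num_steps+1), instead of A's two sequential loops that mutate a running coordinate one unit per iteration and copy it each step.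
import Mathlib
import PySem

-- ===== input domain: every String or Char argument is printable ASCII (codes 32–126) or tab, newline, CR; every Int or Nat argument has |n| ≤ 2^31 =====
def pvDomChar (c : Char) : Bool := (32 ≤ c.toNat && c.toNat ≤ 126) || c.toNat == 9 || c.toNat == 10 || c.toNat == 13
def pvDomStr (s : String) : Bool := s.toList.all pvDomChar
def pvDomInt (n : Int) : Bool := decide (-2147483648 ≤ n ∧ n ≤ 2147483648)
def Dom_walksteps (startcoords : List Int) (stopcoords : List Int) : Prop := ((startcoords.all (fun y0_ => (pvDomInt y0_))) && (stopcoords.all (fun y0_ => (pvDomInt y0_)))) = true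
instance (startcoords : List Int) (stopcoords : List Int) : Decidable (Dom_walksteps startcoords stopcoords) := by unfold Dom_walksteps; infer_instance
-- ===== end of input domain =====

-- B computes the k-th path coordinate by a closed-form function of the step index k (one
-- comprehension over range(1, num_steps+1)), instead of A's two sequential loops that mutate
-- and copy a running coordinate one unit per iteration; same cost, different algorithm.

-- ===== PORT A =====
-- one loop body of A (index j = 0 for the x loop, j = 1 for the y loop); state = (currcoord, path)
def walkstepsStep (j : Nat) (sd : Int) (st : List Int × List (List Int)) : List Int × List (List Int) :=
  if sd < 0 then
    let c := st.1.set j (st.1.getD j 0 - 1)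
    (c, st.2 ++ [c])
  else if sd > 0 then
    let c := st.1.set j (st.1.getD j 0 + 1)
    (c, st.2 ++ [c])
  else st

def walksteps (startcoords : List Int) (stopcoords : List Int) : List (List Int) × Int :=
  let stepsxdir := stopcoords.getD 0 0 - startcoords.getD 0 0
  let stepsydir := stopcoords.getD 1 0 - startcoords.getD 1 0
  let num_steps : Int := (stepsxdir.natAbs : Int) + (stepsydir.natAbs : Int)
  let st1 := (List.range stepsxdir.natAbs).foldl (fun a _ => walkstepsStep 0 stepsxdir a) (startcoords, [startcoords])
  let st2 := (List.range stepsydir.natAbs).foldl (fun a _ => walkstepsStep 1 stepsydir a) st1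
  (st2.2, num_steps)

-- ===== PORT B =====
-- closed-form coordinate of the k-th step of the Manhattan path (helper `coord` in Source B)
def walkstepsCoord (startcoords stopcoords : List Int) (sx sy ax : Int) (k : Int) : List Int :=
  if k ≤ ax then
    startcoords.set 0 (startcoords.getD 0 0 + (if sx > 0 then k else -k))
  else
    (startcoords.set 0 (stopcoords.getD 0 0)).set 1
      (startcoords.getD 1 0 + (if sy > 0 then (k - ax) else -(k - ax)))

def walksteps_alt (startcoords : List Int) (stopcoords : List Int) : List (List Int) × Int :=
  let sx := stopcoords.getD 0 0 - startcoords.getD 0 0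
  let sy := stopcoords.getD 1 0 - startcoords.getD 1 0
  let ax : Int := sx.natAbs
  let num_steps : Int := sx.natAbs + sy.natAbs
  (startcoords ::
     (PySem.List.pyRange 1 (num_steps + 1) 1).map (walkstepsCoord startcoords stopcoords sx sy ax),
   num_steps)

-- ===== PRECONDITION & SPEC =====
-- Python A indexes [0] and [1] of both arguments: lists of length < 2 raise IndexError.
def Pre_walksteps (startcoords : List Int) (stopcoords : List Int) : Prop :=
  2 ≤ startcoords.length ∧ 2 ≤ stopcoords.length
instance (startcoords : List Int) (stopcoords : List Int) : Decidable (Pre_walksteps startcoords stopcoords) := by unfold Pre_walksteps; infer_instance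
def pvWitness_walksteps : List Int × List Int := ([0, 2], [3, -1])

def Spec_walksteps (startcoords : List Int) (stopcoords : List Int) (out : List (List Int) × Int) : Prop := out = walksteps_alt startcoords stopcoords
instance (startcoords : List Int) (stopcoords : List Int) (out : List (List Int) × Int) : Decidable (Spec_walksteps startcoords stopcoords out) := by unfold Spec_walksteps; infer_instance

-- ===== CLAIM (what is proved, stated in full; the proofs are below) =====
def Claim_equal_walksteps : Prop := ∀ (startcoords : List Int) (stopcoords : List Int), Dom_walksteps startcoords stopcoords → Pre_walksteps startcoords stopcoords → Spec_walksteps startcoords stopcoords (walksteps startcoords stopcoords)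

-- ===== LEMMAS AND PROOFS =====

lemma getD_set_self (l : List Int) (j : Nat) (v : Int) (h : j < l.length) :
    (l.set j v).getD j 0 = v := by
  rw [List.getD_eq_getElem _ _ (by simpa using h), List.getElem_set]
  simp

lemma set_getD_self (l : List Int) (j : Nat) (h : j < l.length) :
    l.set j (l.getD j 0) = l := by
  apply List.ext_getElem
  · simp
  · intro i h1 h2
    rw [List.getElem_set]
    split
    · next heq => subst heq; rw [List.getD_eq_getElem _ _ h]
    · rfl

-- A's per-axis loop, characterised: n unit steps from value (curr.getD j 0), direction ±1.
lemma loop_char (j : Nat) (sd : Int) (hsd : sd ≠ 0) (n : Nat) (curr : List Int)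
    (path : List (List Int)) (hj : j < curr.length) :
    (List.range n).foldl (fun a _ => walkstepsStep j sd a) (curr, path)
      = (curr.set j (curr.getD j 0 + (n : Int) * (if sd > 0 then 1 else -1)),
         path ++ (List.range n).map
           (fun (i : Nat) => curr.set j (curr.getD j 0 + ((i : Int) + 1) * (if sd > 0 then 1 else -1)))) := by
  induction n with
  | zero =>
    simp only [List.range_zero, List.foldl_nil, Nat.cast_zero, zero_mul, add_zero,
      List.map_nil, List.append_nil, set_getD_self curr j hj]
  | succ n ih =>
    rw [List.range_succ, List.foldl_append, ih, List.map_append, List.map_cons, List.map_nil,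
      List.foldl_cons, List.foldl_nil]
    rcases lt_trichotomy sd 0 with h | h | h
    · have hd : ¬ sd > 0 := by omega
      simp only [walkstepsStep, if_pos h, if_neg hd]
      rw [getD_set_self _ _ _ hj, List.set_set]
      have hv : curr.getD j 0 + (n : Int) * -1 - 1 = curr.getD j 0 + ((n : Int) + 1) * -1 := by ring
      rw [hv, Prod.mk.injEq]
      refine ⟨by congr 1, ?_⟩
      rw [List.append_assoc]
    · exact absurd h hsd
    · have hd : ¬ sd < 0 := by omega
      simp only [walkstepsStep, if_neg hd, if_pos h]
      rw [getD_set_self _ _ _ hj, List.set_set]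
      have hv : curr.getD j 0 + (n : Int) * 1 + 1 = curr.getD j 0 + ((n : Int) + 1) * 1 := by ring
      rw [hv, Prod.mk.injEq]
      refine ⟨by congr 1, ?_⟩
      rw [List.append_assoc]

-- one axis of A: the fold reaches value b and appends one copy per unit step
lemma axis_char (curr : List Int) (path : List (List Int)) (j : Nat) (a b : Int)
    (hj : j < curr.length) (ha : curr.getD j 0 = a) :
    (List.range (b - a).natAbs).foldl (fun acc _ => walkstepsStep j (b - a) acc) (curr, path)
      = (curr.set j b,
         path ++ (List.range (b - a).natAbs).map
           (fun (i : Nat) => curr.set j (a + ((i : Int) + 1) * (if b - a > 0 then 1 else -1)))) := by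
  rcases eq_or_ne (b - a) 0 with h | h
  · have hb : b = a := by omega
    rw [h]
    simp only [Int.natAbs_zero, List.range_zero, List.foldl_nil, List.map_nil, List.append_nil]
    rw [hb, ← ha, set_getD_self curr j hj]
  · rw [loop_char j (b - a) h _ curr path hj, ha]
    have hcast : a + ((b - a).natAbs : Int) * (if b - a > 0 then 1 else -1) = b := by
      by_cases hgt : b - a > 0
      · simp only [if_pos hgt, mul_one]; omega
      · simp only [if_neg hgt, mul_neg_one]; omega
    rw [hcast]

-- B's comprehension splits at ax into exactly A's two per-axis sweeps.
lemma alt_list_char (s t : List Int) :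
    (PySem.List.pyRange 1 (((t.getD 0 0 - s.getD 0 0).natAbs : Int) + ((t.getD 1 0 - s.getD 1 0).natAbs : Int) + 1) 1).map
        (walkstepsCoord s t (t.getD 0 0 - s.getD 0 0) (t.getD 1 0 - s.getD 1 0) ((t.getD 0 0 - s.getD 0 0).natAbs : Int))
      = (List.range (t.getD 0 0 - s.getD 0 0).natAbs).map
          (fun (i : Nat) => s.set 0 (s.getD 0 0 + ((i : Int) + 1) * (if t.getD 0 0 - s.getD 0 0 > 0 then 1 else -1)))
        ++ (List.range (t.getD 1 0 - s.getD 1 0).natAbs).map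
          (fun (i : Nat) => (s.set 0 (t.getD 0 0)).set 1 (s.getD 1 0 + ((i : Int) + 1) * (if t.getD 1 0 - s.getD 1 0 > 0 then 1 else -1))) := by
  set sx := t.getD 0 0 - s.getD 0 0 with hsx
  set sy := t.getD 1 0 - s.getD 1 0 with hsy
  set ax : Int := (sx.natAbs : Int) with hax
  rw [PySem.List.pyRange_one_append 1 (ax + 1) ((sx.natAbs : Int) + (sy.natAbs : Int) + 1)
        (by omega) (by omega), List.map_append]
  congr 1
  · -- x segment: k ∈ [1, ax+1)
    rw [PySem.List.pyRange_one]
    have hlen : (ax + 1 - 1).toNat = sx.natAbs := by omega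
    rw [hlen, List.map_map]
    apply List.map_congr_left
    intro i hi
    rw [List.mem_range] at hi
    simp only [Function.comp, walkstepsCoord]
    have hk : (1 : Int) + (i : Int) ≤ ax := by omega
    rw [if_pos hk]
    congr 1
    by_cases h : sx > 0
    · simp only [if_pos h]; ring
    · simp only [if_neg h]; ring
  · -- y segment: k ∈ [ax+1, n+1)
    rw [PySem.List.pyRange_one]
    have hlen : ((sx.natAbs : Int) + (sy.natAbs : Int) + 1 - (ax + 1)).toNat = sy.natAbs := by omega
    rw [hlen, List.map_map]
    apply List.map_congr_left
    intro i hi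
    rw [List.mem_range] at hi
    simp only [Function.comp, walkstepsCoord]
    have hk : ¬ (ax + 1 + (i : Int) ≤ ax) := by omega
    rw [if_neg hk]
    congr 1
    by_cases h : sy > 0
    · simp only [if_pos h]; ring
    · simp only [if_neg h]; ring

-- ===== VERDICT (by name: the statement is the Claim_ definition above) =====
theorem walksteps_spec : Claim_equal_walksteps := by
  intro s t _ hpre
  obtain ⟨hs, ht⟩ := hpre
  show walksteps s t = walksteps_alt s t
  unfold walksteps walksteps_alt
  simp only []
  have h0 : (0 : Nat) < s.length := by omega
  rw [axis_char s [s] 0 (s.getD 0 0) (t.getD 0 0) h0 rfl]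
  have hlen : (1 : Nat) < (s.set 0 (t.getD 0 0)).length := by
    rw [List.length_set]; omega
  have hg1 : (s.set 0 (t.getD 0 0)).getD 1 0 = s.getD 1 0 := by
    simp [List.getD_eq_getElem?_getD]
  rw [axis_char (s.set 0 (t.getD 0 0)) _ 1 (s.getD 1 0) (t.getD 1 0) hlen hg1]
  rw [alt_list_char s t]
  simp
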